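-- pv_equiv track=rewrite | github.com/QtTao/daily_leetcode | 1254.统计封闭岛屿的数目/solution.py | closedIslandBFS
-- ===== SOURCE A (Python) =====
-- from typing import List
--
-- def closedIslandBFS(grid: List[List[int]]) -> int:
--     """ BFS """
--     m, n = len(grid), len(grid[0])
--
--     def bfs(i: int, j: int) -> bool:
--         """ 广度优先搜索某一个岛屿中的所有陆地 """
--         queue = [(i, j)]
--         # 注意不能遇到网格边界，就停止搜索，因为需要标记陆地的访问记录
--         is_closed = True
--         while queue:
--             x, y = queue.pop(0)
--             # 超出网格边界，不是封闭岛屿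
--             if not (0 <= x < m and 0 <= y < n):
--                 is_closed = False
--             # 当前位置是水域或者已访问的陆地，继续搜索其他区域
--             elif grid[x][y] != 0:
--                 continue
--             else:
--                 # 标记已访问，同时将四周位置加入队列，等待下一轮搜索
--                 grid[x][y] = 2
--                 queue.extend([
--                     (x - 1, y),
--                     (x + 1, y),
--                     (x, y - 1),
--                     (x, y + 1)
--                 ])
--         return is_closed
--
--     num = 0
--     for i in range(m):
--         for j in range(n):
--             # 封闭岛屿，数量加一
--             if grid[i][j] == 0 and bfs(i, j):
--                 num += 1
--     return num
-- ===== SOURCE B (Python) =====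
-- from typing import List
--
-- def closedIslandBFS(grid: List[List[int]]) -> int:
--     """ Iterative stack flood fill that COLLECTS each component, then decides
--     closed-ness by a separate interior test on the collected cells (never
--     pushes out-of-bounds cells).  Same grid mutation (every 0 becomes 2). """
--     m, n = len(grid), len(grid[0])
--
--     def flood(i: int, j: int) -> list:
--         """ collect the whole 0-component of (i, j), marking it with 2 """
--         stack = [(i, j)]
--         comp = []
--         while stack:
--             x, y = stack.pop()
--             if grid[x][y] != 0:
--                 continue
--             grid[x][y] = 2
--             comp.append((x, y))
--             for nx, ny in ((x - 1, y), (x + 1, y), (x, y - 1), (x, y + 1)):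
--                 if 0 <= nx < m and 0 <= ny < n:
--                     stack.append((nx, ny))
--         return comp
--
--     num = 0
--     for i in range(m):
--         for j in range(n):
--             if grid[i][j] == 0:
--                 comp = flood(i, j)
--                 if all(0 < x < m - 1 and 0 < y < n - 1 for x, y in comp):
--                     num += 1
--     return num
-- ===== Notes on version B (the rewrite author's own statement) =====
-- stated objective: alternative
-- what changed: Replaces A's BFS that probes out-of-bounds queue entries to decide closed-ness by a stack flood fill that only ever pushes in-bounds cells, collects the whole component into a list, and decides closed-ness afterwards by a separate interior-border test over the collected cells.
import Mathlib
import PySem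

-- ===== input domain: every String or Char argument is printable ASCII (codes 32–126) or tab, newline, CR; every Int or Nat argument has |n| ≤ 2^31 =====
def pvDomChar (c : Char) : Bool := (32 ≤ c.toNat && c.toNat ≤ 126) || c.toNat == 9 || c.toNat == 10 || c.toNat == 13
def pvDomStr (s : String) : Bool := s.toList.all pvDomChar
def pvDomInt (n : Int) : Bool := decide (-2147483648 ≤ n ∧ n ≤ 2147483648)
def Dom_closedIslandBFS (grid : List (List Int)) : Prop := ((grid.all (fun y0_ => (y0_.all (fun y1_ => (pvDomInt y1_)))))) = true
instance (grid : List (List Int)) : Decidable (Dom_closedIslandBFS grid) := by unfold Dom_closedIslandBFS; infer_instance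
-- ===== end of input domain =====

-- B replaces A's out-of-bounds-probing BFS by a stack flood fill that only pushes in-bounds
-- cells, collects the component, and tests closed-ness afterwards by an interior-border test;
-- both mutate the Python grid identically (every 0 becomes 2); equal return value on Pre_.

-- ===== PORT A =====
-- grid[x][y] / grid[x][y] = v; exact for the 0 ≤ x < m, 0 ≤ y < n accesses the ports perform (all
-- raw accesses are guarded by the bounds test; Pre_ guarantees those indices are in range).
def gridGet (g : List (List Int)) (x y : Int) : Int :=
  PySem.List.pyGetD (PySem.List.pyGetD g x []) y 0

def gridSet (g : List (List Int)) (x y : Int) (v : Int) : List (List Int) :=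
  PySem.List.pySetD g x (PySem.List.pySetD (PySem.List.pyGetD g x []) y v)

-- the 'while queue:' loop of A's bfs; fuel 5*cells+1 is enough (each iteration pops one element,
-- and marking a 0-cell happens at most once per cell, pushing four elements)
def bfsLoop (m n : Int) : Nat → List (List Int) → List (Int × Int) → Bool → List (List Int) × Bool
  | 0, g, _, c => (g, c)
  | _ + 1, g, [], c => (g, c)
  | fuel + 1, g, (x, y) :: rest, c =>
    if ¬(0 ≤ x ∧ x < m ∧ 0 ≤ y ∧ y < n) then
      bfsLoop m n fuel g rest false
    else if gridGet g x y ≠ 0 then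
      bfsLoop m n fuel g rest c
    else
      bfsLoop m n fuel (gridSet g x y 2) (rest ++ [(x - 1, y), (x + 1, y), (x, y - 1), (x, y + 1)]) c

def bfsRun (m n : Int) (g : List (List Int)) (i j : Int) : List (List Int) × Bool :=
  bfsLoop m n (5 * (g.map List.length).sum + 1) g [(i, j)] true

def closedIslandBFS (grid : List (List Int)) : Int :=
  let m : Int := grid.length
  let n : Int := (PySem.List.pyGetD grid 0 []).length
  ((PySem.List.pyRange 0 m 1).foldl (fun st i =>
      (PySem.List.pyRange 0 n 1).foldl (fun st j =>
          if gridGet st.1 i j = 0 then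
            let r := bfsRun m n st.1 i j
            (r.1, st.2 + if r.2 then 1 else 0)
          else st) st) (grid, (0 : Int))).2

-- ===== PORT B =====
-- the four guarded pushes of B's flood; the Lean list is the Python stack REVERSED, so a Python
-- append is a cons here and Python's pop() (pop last) is taking the head
def push4 (m n x y : Int) (rest : List (Int × Int)) : List (Int × Int) :=
  let s1 := if 0 ≤ x - 1 ∧ x - 1 < m ∧ 0 ≤ y ∧ y < n then (x - 1, y) :: rest else rest
  let s2 := if 0 ≤ x + 1 ∧ x + 1 < m ∧ 0 ≤ y ∧ y < n then (x + 1, y) :: s1 else s1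
  let s3 := if 0 ≤ x ∧ x < m ∧ 0 ≤ y - 1 ∧ y - 1 < n then (x, y - 1) :: s2 else s2
  if 0 ≤ x ∧ x < m ∧ 0 ≤ y + 1 ∧ y + 1 < n then (x, y + 1) :: s3 else s3

-- B's 'while stack:' loop, accumulating the component list; fuel 5*cells+1 as for A
def floodLoop (m n : Int) :
    Nat → List (List Int) → List (Int × Int) → List (Int × Int) → List (List Int) × List (Int × Int)
  | 0, g, _, comp => (g, comp)
  | _ + 1, g, [], comp => (g, comp)
  | fuel + 1, g, (x, y) :: rest, comp =>
    if gridGet g x y ≠ 0 then floodLoop m n fuel g rest comp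
    else floodLoop m n fuel (gridSet g x y 2) (push4 m n x y rest) (comp ++ [(x, y)])

def floodRun (m n : Int) (g : List (List Int)) (i j : Int) : List (List Int) × List (Int × Int) :=
  floodLoop m n (5 * (g.map List.length).sum + 1) g [(i, j)] []

-- all(0 < x < m-1 and 0 < y < n-1 for x, y in comp)
def isClosedComp (m n : Int) (comp : List (Int × Int)) : Bool :=
  comp.all (fun p => decide (0 < p.1 ∧ p.1 < m - 1 ∧ 0 < p.2 ∧ p.2 < n - 1))

def closedIslandBFS_alt (grid : List (List Int)) : Int :=
  let m : Int := grid.length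
  let n : Int := (PySem.List.pyGetD grid 0 []).length
  (((PySem.List.pyRange 0 m 1).flatMap (fun i =>
        (PySem.List.pyRange 0 n 1).map (fun j => (i, j)))).foldl
      (fun st ij =>
        if gridGet st.1 ij.1 ij.2 = 0 then
          let r := floodRun m n st.1 ij.1 ij.2
          (r.1, st.2 + if isClosedComp m n r.2 then 1 else 0)
        else st) (grid, (0 : Int))).2

-- ===== PRECONDITION & SPEC =====
-- Pre_ excludes exactly the inputs where A raises IndexError: the empty grid (grid[0]) and grids
-- with a row shorter than the first row (the column loop indexes every row at all j < n).
def Pre_closedIslandBFS (grid : List (List Int)) : Prop :=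
  grid ≠ [] ∧ ∀ row ∈ grid, (grid.headD []).length ≤ row.length
instance (grid : List (List Int)) : Decidable (Pre_closedIslandBFS grid) := by
  unfold Pre_closedIslandBFS; infer_instance

def pvWitness_closedIslandBFS : List (List Int) := [[1, 1, 1], [1, 0, 1], [1, 1, 1]]

def Spec_closedIslandBFS (grid : List (List Int)) (out : Int) : Prop := out = closedIslandBFS_alt grid
instance (grid : List (List Int)) (out : Int) : Decidable (Spec_closedIslandBFS grid out) := by unfold Spec_closedIslandBFS; infer_instance

-- ===== CLAIM (what is proved, stated in full; the proofs are below) =====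
def Claim_equal_closedIslandBFS : Prop := ∀ (grid : List (List Int)), Dom_closedIslandBFS grid → Pre_closedIslandBFS grid → Spec_closedIslandBFS grid (closedIslandBFS grid)

-- ===== LEMMAS AND PROOFS =====

-- proof-side vocabulary -------------------------------------------------------

-- well-formedness of the working grid: m rows, every row at least n wide
def Wf (m n : Int) (g : List (List Int)) : Prop :=
  (g.length : Int) = m ∧ ∀ row ∈ g, n ≤ (row.length : Int)

def nbrsC (p : Int × Int) : List (Int × Int) :=
  [(p.1 - 1, p.2), (p.1 + 1, p.2), (p.1, p.2 - 1), (p.1, p.2 + 1)]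

def inbC (m n : Int) (p : Int × Int) : Prop :=
  0 ≤ p.1 ∧ p.1 < m ∧ 0 ≤ p.2 ∧ p.2 < n

-- the 0-cells reachable from the source list q through 0-cells of g
inductive ReachC (m n : Int) (g : List (List Int)) (q : List (Int × Int)) : (Int × Int) → Prop
  | base {p} : p ∈ q → inbC m n p → gridGet g p.1 p.2 = 0 → ReachC m n g q p
  | step {s t} : ReachC m n g q s → t ∈ nbrsC s → inbC m n t → gridGet g t.1 t.2 = 0 →
      ReachC m n g q t

-- some reached cell has an out-of-bounds neighbour (the island is not closed)
def BadC (m n : Int) (g : List (List Int)) (q : List (Int × Int)) : Prop :=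
  ∃ p, ReachC m n g q p ∧ ∃ t ∈ nbrsC p, ¬ inbC m n t

def BadQ (m n : Int) (q : List (Int × Int)) : Prop := ∃ p ∈ q, ¬ inbC m n p

def zerosN (g : List (List Int)) : Nat := (g.map (fun row => row.count 0)).sum

-- "gOut is g with exactly the cells of R overwritten by 2" (plus: same shape)
def markSpec (g gOut : List (List Int)) (R : (Int × Int) → Prop) : Prop :=
  gOut.map List.length = g.map List.length ∧
  ∀ x y : Int, 0 ≤ x → 0 ≤ y →
    (R (x, y) → gridGet gOut x y = 2) ∧ (¬ R (x, y) → gridGet gOut x y = gridGet g x y)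

-- basic facts -----------------------------------------------------------------

theorem reach_mono {m n : Int} {g : List (List Int)} {q q' : List (Int × Int)} {p : Int × Int}
    (hsub : ∀ x ∈ q, x ∈ q') (h : ReachC m n g q p) : ReachC m n g q' p := by
  induction h with
  | base hm h1 h2 => exact ReachC.base (hsub _ hm) h1 h2
  | step _ hn h1 h2 ih => exact ReachC.step ih hn h1 h2

-- only the IN-BOUNDS sources matter
theorem reach_sources_mono {m n : Int} {g : List (List Int)} {q q' : List (Int × Int)} {p : Int × Int}
    (hsub : ∀ x, inbC m n x → x ∈ q → x ∈ q') (h : ReachC m n g q p) : ReachC m n g q' p := by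
  induction h with
  | base hm h1 h2 => exact ReachC.base (hsub _ h1 hm) h1 h2
  | step _ hn h1 h2 ih => exact ReachC.step ih hn h1 h2

theorem reach_sources_iff {m n : Int} {g : List (List Int)} {q q' : List (Int × Int)}
    (h : ∀ x, inbC m n x → (x ∈ q ↔ x ∈ q')) (z : Int × Int) :
    ReachC m n g q z ↔ ReachC m n g q' z :=
  ⟨reach_sources_mono (fun x hx hm => (h x hx).1 hm),
   reach_sources_mono (fun x hx hm => (h x hx).2 hm)⟩

theorem reach_inb {m n : Int} {g : List (List Int)} {q : List (Int × Int)} {p : Int × Int}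
    (h : ReachC m n g q p) : inbC m n p := by
  cases h with
  | base _ h1 _ => exact h1
  | step _ _ h1 _ => exact h1

theorem gridGet_nat (g : List (List Int)) (a b : Nat) :
    gridGet g (a : Int) (b : Int) = (g.getD a []).getD b 0 := by
  simp [gridGet, PySem.List.pyGetD_natCast]

theorem reach_cons_irrel {m n : Int} {g : List (List Int)} {q : List (Int × Int)} {p z : Int × Int}
    (hp : ¬ (inbC m n p ∧ gridGet g p.1 p.2 = 0)) :
    ReachC m n g (p :: q) z ↔ ReachC m n g q z := by
  constructor
  · intro h
    induction h with
    | base hm h1 h2 =>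
      rcases List.mem_cons.1 hm with rfl | hq
      · exact absurd ⟨h1, h2⟩ hp
      · exact ReachC.base hq h1 h2
    | step _ hn h1 h2 ih => exact ReachC.step ih hn h1 h2
  · exact reach_mono (fun x hx => List.mem_cons_of_mem _ hx)

theorem sum_set_nat (l : List Nat) (i a : Nat) (h : i < l.length) :
    (l.set i a).sum + l[i] = l.sum + a := by
  have hd : l.sum = (l.take i).sum + (l[i] + (l.drop (i + 1)).sum) := by
    conv_lhs => rw [← List.take_append_drop i l]
    rw [List.sum_append, List.drop_eq_getElem_cons h, List.sum_cons]
  rw [List.sum_set, if_pos h]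
  omega

theorem gridGet_set {m n : Int} {g : List (List Int)} {x y : Int}
    (hwf : Wf m n g) (hin : inbC m n (x, y)) (x' y' : Int) (hx' : 0 ≤ x') (hy' : 0 ≤ y') :
    gridGet (gridSet g x y 2) x' y' = if x' = x ∧ y' = y then 2 else gridGet g x' y' := by
  obtain ⟨hx0, hxm, hy0, hyn⟩ := hin
  obtain ⟨hlen, hrows⟩ := hwf
  simp only at hx0 hxm hy0 hyn
  lift x to ℕ using hx0
  lift y to ℕ using hy0
  lift x' to ℕ using hx'
  lift y' to ℕ using hy'
  have hxg : x < g.length := by exact_mod_cast hlen ▸ hxm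
  have hyrow : y < (g[x]).length := by
    have := hrows _ (List.getElem_mem hxg)
    have : (y : Int) < ((g[x]).length : Int) := lt_of_lt_of_le hyn this
    exact_mod_cast this
  have hrowget : PySem.List.pyGetD g (x : Int) [] = g[x] := by
    rw [PySem.List.pyGetD_natCast, List.getD_eq_getElem _ _ hxg]
  show gridGet (PySem.List.pySetD g (x : Int) (PySem.List.pySetD (PySem.List.pyGetD g (x : Int) []) (y : Int) 2)) _ _ = _
  rw [hrowget]
  show PySem.List.pyGetD (PySem.List.pyGetD (PySem.List.pySetD g (x : Int) (PySem.List.pySetD g[x] (y : Int) 2)) (x' : Int) []) (y' : Int) 0 = _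
  rw [PySem.List.pyGetD_pySetD_natCast g x x' _ [] hxg]
  by_cases hxx : x' = x
  · subst hxx
    rw [if_pos rfl, PySem.List.pyGetD_pySetD_natCast (g[x']) y y' 2 0 hyrow]
    by_cases hyy : y' = y
    · subst hyy
      rw [if_pos rfl, if_pos ⟨rfl, rfl⟩]
    · rw [if_neg hyy, if_neg (by rintro ⟨-, h2⟩; exact hyy (by exact_mod_cast h2))]
      show _ = PySem.List.pyGetD (PySem.List.pyGetD g (x' : Int) []) (y' : Int) 0
      rw [hrowget]
  · rw [if_neg hxx, if_neg (by rintro ⟨h1, -⟩; exact hxx (by exact_mod_cast h1))]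
    rfl

theorem shape_set {m n : Int} {g : List (List Int)} {x y : Int}
    (hwf : Wf m n g) (hin : inbC m n (x, y)) :
    (gridSet g x y 2).map List.length = g.map List.length := by
  obtain ⟨hx0, hxm, hy0, hyn⟩ := hin
  obtain ⟨hlen, hrows⟩ := hwf
  simp only at hx0 hxm hy0 hyn
  lift x to ℕ using hx0
  lift y to ℕ using hy0
  have hxg : x < g.length := by exact_mod_cast hlen ▸ hxm
  have hrowget : PySem.List.pyGetD g (x : Int) [] = g[x] := by
    rw [PySem.List.pyGetD_natCast, List.getD_eq_getElem _ _ hxg]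
  unfold gridSet
  rw [hrowget, PySem.List.pySetD_of_nonneg _ _ (by positivity),
      PySem.List.pySetD_of_nonneg _ _ (by positivity), List.map_set]
  simp only [Int.toNat_natCast, List.length_set]
  have : (g.map List.length)[x]'(by simpa using hxg) = (g[x]).length := by simp
  rw [← this, List.set_getElem_self]

theorem wf_of_shape {m n : Int} {g g' : List (List Int)}
    (h : g'.map List.length = g.map List.length) (hwf : Wf m n g) : Wf m n g' := by
  obtain ⟨hlen, hrows⟩ := hwf
  constructor
  · have := congrArg List.length h
    simp only [List.length_map] at this
    omega
  · intro row hrow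
    have hmem : row.length ∈ g.map List.length := h ▸ List.mem_map_of_mem hrow
    obtain ⟨row0, hrow0, hl⟩ := List.mem_map.1 hmem
    rw [← hl]
    exact hrows row0 hrow0

theorem zerosN_set {m n : Int} {g : List (List Int)} {x y : Int}
    (hwf : Wf m n g) (hin : inbC m n (x, y)) (h0 : gridGet g x y = 0) :
    zerosN (gridSet g x y 2) + 1 = zerosN g := by
  obtain ⟨hx0, hxm, hy0, hyn⟩ := hin
  obtain ⟨hlen, hrows⟩ := hwf
  simp only at hx0 hxm hy0 hyn
  lift x to ℕ using hx0
  lift y to ℕ using hy0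
  have hxg : x < g.length := by exact_mod_cast hlen ▸ hxm
  have hyrow : y < (g[x]).length := by
    have := hrows _ (List.getElem_mem hxg)
    have : (y : Int) < ((g[x]).length : Int) := lt_of_lt_of_le hyn this
    exact_mod_cast this
  have hrowget : PySem.List.pyGetD g (x : Int) [] = g[x] := by
    rw [PySem.List.pyGetD_natCast, List.getD_eq_getElem _ _ hxg]
  have hentry : (g[x])[y] = 0 := by
    rw [gridGet_nat, List.getD_eq_getElem _ _ hxg, List.getD_eq_getElem _ _ hyrow] at h0
    exact h0
  unfold gridSet zerosN
  rw [hrowget, PySem.List.pySetD_of_nonneg _ _ (by positivity),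
      PySem.List.pySetD_of_nonneg _ _ (by positivity), List.map_set]
  simp only [Int.toNat_natCast]
  have hcnt : ((g[x]).set y 2).count 0 + 1 = (g[x]).count 0 := by
    rw [List.count_set (by simpa using hyrow)]
    have hmem : (0 : Int) ∈ g[x] := hentry ▸ List.getElem_mem hyrow
    have hpos : 0 < (g[x]).count 0 := List.count_pos_iff.2 hmem
    simp [hentry]
    omega
  have hs := sum_set_nat (g.map (fun row => row.count 0)) x (((g[x]).set y 2).count 0)
      (by simpa using hxg)
  have hgetm : (g.map (fun row => row.count 0))[x]'(by simpa using hxg) = (g[x]).count 0 := by simp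
  rw [hgetm] at hs
  omega

theorem zerosN_le_cells (g : List (List Int)) : zerosN g ≤ (g.map List.length).sum := by
  unfold zerosN
  exact List.sum_le_sum (fun row _ => List.count_le_length)

-- two grids marked the same way from the same grid are equal
theorem markSpec_unique {g g1 g2 : List (List Int)} {R : (Int × Int) → Prop}
    (h1 : markSpec g g1 R) (h2 : markSpec g g2 R) : g1 = g2 := by
  obtain ⟨hs1, hp1⟩ := h1
  obtain ⟨hs2, hp2⟩ := h2
  have hshape : g1.map List.length = g2.map List.length := hs1.trans hs2.symm
  have hlen : g1.length = g2.length := by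
    have := congrArg List.length hshape; simpa using this
  apply List.ext_getElem hlen
  intro k hk1 hk2
  have hrl : (g1[k]).length = (g2[k]).length := by
    have e1 : (g1[k]).length = (g1.map List.length)[k]'(by simpa using hk1) := by simp
    have e2 : (g2[k]).length = (g2.map List.length)[k]'(by simpa using hk2) := by simp
    rw [e1, e2]
    exact List.getElem_of_eq hshape _
  apply List.ext_getElem hrl
  intro j hj1 hj2
  have e1 : gridGet g1 (k : Int) (j : Int) = (g1[k])[j] := by
    rw [gridGet_nat, List.getD_eq_getElem _ _ hk1, List.getD_eq_getElem _ _ hj1]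
  have e2 : gridGet g2 (k : Int) (j : Int) = (g2[k])[j] := by
    rw [gridGet_nat, List.getD_eq_getElem _ _ hk2, List.getD_eq_getElem _ _ (hrl ▸ hj1)]
  by_cases hR : R ((k : Int), (j : Int))
  · rw [← e1, ← e2, (hp1 k j (by positivity) (by positivity)).1 hR,
        (hp2 k j (by positivity) (by positivity)).1 hR]
  · rw [← e1, ← e2, (hp1 k j (by positivity) (by positivity)).2 hR,
        (hp2 k j (by positivity) (by positivity)).2 hR]

-- KEY LEMMA: marking one in-bounds 0-cell p and replacing it by its neighbours as sources
theorem reach_mark_one {m n : Int} {g : List (List Int)} {x y : Int} {q : List (Int × Int)}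
    (hwf : Wf m n g) (hin : inbC m n (x, y)) (h0 : gridGet g x y = 0) (z : Int × Int) :
    ReachC m n g ((x, y) :: q) z ↔
      z = (x, y) ∨ ReachC m n (gridSet g x y 2) (q ++ nbrsC (x, y)) z := by
  have key : ∀ w : Int × Int, inbC m n w →
      (gridGet (gridSet g x y 2) w.1 w.2 = 0 ↔ (w ≠ (x, y) ∧ gridGet g w.1 w.2 = 0)) := by
    intro w hw
    rw [gridGet_set hwf hin w.1 w.2 hw.1 hw.2.2.1]
    by_cases hc : w.1 = x ∧ w.2 = y
    · rw [if_pos hc]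
      constructor
      · intro h; omega
      · rintro ⟨hne, -⟩; exact absurd (Prod.ext hc.1 hc.2) hne
    · rw [if_neg hc]
      constructor
      · intro h
        exact ⟨by rintro rfl; exact hc ⟨rfl, rfl⟩, h⟩
      · rintro ⟨-, h⟩; exact h
  constructor
  · intro h
    induction h with
    | @base z hm h1 h2 =>
      by_cases hz : z = (x, y)
      · exact Or.inl hz
      · rcases List.mem_cons.1 hm with rfl | hq
        · exact Or.inl rfl
        · exact Or.inr (ReachC.base (List.mem_append_left _ hq) h1
            ((key z h1).2 ⟨hz, h2⟩))
    | @step s t hs hn h1 h2 ih =>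
      by_cases ht : t = (x, y)
      · exact Or.inl ht
      rcases ih with rfl | hr
      · exact Or.inr (ReachC.base (List.mem_append_right _ hn) h1 ((key t h1).2 ⟨ht, h2⟩))
      · exact Or.inr (ReachC.step hr hn h1 ((key t h1).2 ⟨ht, h2⟩))
  · intro h
    rcases h with rfl | h
    · exact ReachC.base List.mem_cons_self hin h0
    · induction h with
      | @base w hm h1 h2 =>
        obtain ⟨hne, h0w⟩ := (key w h1).1 h2
        rcases List.mem_append.1 hm with hq | hn
        · exact ReachC.base (List.mem_cons_of_mem _ hq) h1 h0w
        · exact ReachC.step (ReachC.base List.mem_cons_self hin h0) hn h1 h0w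
      | @step s t hs hn h1 h2 ih =>
        obtain ⟨-, h0t⟩ := (key t h1).1 h2
        exact ReachC.step ih hn h1 h0t

theorem reach_nil {m n : Int} {g : List (List Int)} {z : Int × Int} : ¬ ReachC m n g [] z := by
  intro h
  induction h with
  | base hm _ _ => cases hm
  | step _ _ _ _ ih => exact ih

theorem markSpec_congr {g g' : List (List Int)} {R R' : (Int × Int) → Prop}
    (h : ∀ z, R z ↔ R' z) (hm : markSpec g g' R) : markSpec g g' R' := by
  obtain ⟨hs, hp⟩ := hm
  exact ⟨hs, fun x y hx hy =>
    ⟨fun hr => (hp x y hx hy).1 ((h _).2 hr), fun hr => (hp x y hx hy).2 fun c => hr ((h _).1 c)⟩⟩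

theorem markSpec_of_empty {g : List (List Int)} {R : (Int × Int) → Prop}
    (h : ∀ z, ¬ R z) : markSpec g g R :=
  ⟨rfl, fun x y _ _ => ⟨fun hr => absurd hr (h _), fun _ => rfl⟩⟩

theorem badC_congr {m n : Int} {g g' : List (List Int)} {q q' : List (Int × Int)}
    (h : ∀ z, ReachC m n g q z ↔ ReachC m n g' q' z) : BadC m n g q ↔ BadC m n g' q' := by
  unfold BadC
  constructor
  · rintro ⟨p, hp, ht⟩; exact ⟨p, (h p).1 hp, ht⟩
  · rintro ⟨p, hp, ht⟩; exact ⟨p, (h p).2 hp, ht⟩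

-- BFS characterisation --------------------------------------------------------

theorem bfs_char {m n : Int} : ∀ (fuel : Nat) (g : List (List Int)) (q : List (Int × Int)) (c : Bool),
    Wf m n g → 5 * zerosN g + q.length ≤ fuel →
    markSpec g (bfsLoop m n fuel g q c).1 (ReachC m n g q) ∧
    ((bfsLoop m n fuel g q c).2 = true ↔ c = true ∧ ¬ BadQ m n q ∧ ¬ BadC m n g q) := by
  intro fuel
  induction fuel with
  | zero =>
    intro g q c hwf hle
    have hq : q = [] := by
      cases q with
      | nil => rfl
      | cons a l => simp at hle
    subst hq
    refine ⟨markSpec_of_empty (fun z => reach_nil), ?_⟩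
    show c = true ↔ _
    simp [BadQ, BadC, fun z => @reach_nil m n g z]
  | succ fuel ih =>
    intro g q c hwf hle
    rcases q with _ | ⟨⟨x, y⟩, rest⟩
    · refine ⟨markSpec_of_empty (fun z => reach_nil), ?_⟩
      show c = true ↔ _
      simp [BadQ, BadC, fun z => @reach_nil m n g z]
    · by_cases hC : (0 ≤ x ∧ x < m ∧ 0 ≤ y ∧ y < n)
      · by_cases h0 : gridGet g x y = 0
        · -- marking branch
          have hin : inbC m n (x, y) := hC
          have hstep : bfsLoop m n (fuel + 1) g ((x, y) :: rest) c =
              bfsLoop m n fuel (gridSet g x y 2)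
                (rest ++ [(x - 1, y), (x + 1, y), (x, y - 1), (x, y + 1)]) c := by
            show (if ¬(0 ≤ x ∧ x < m ∧ 0 ≤ y ∧ y < n) then _ else
              if gridGet g x y ≠ 0 then _ else _) = _
            rw [if_neg (not_not_intro hC), if_neg (not_not_intro h0)]
          have hwf' : Wf m n (gridSet g x y 2) := wf_of_shape (shape_set hwf hin) hwf
          have hz := zerosN_set hwf hin h0
          have hle' : 5 * zerosN (gridSet g x y 2) +
              (rest ++ [(x - 1, y), (x + 1, y), (x, y - 1), (x, y + 1)]).length ≤ fuel := by
            simp only [List.length_append, List.length_cons] at hle ⊢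
            simp only [List.length_nil]
            omega
          obtain ⟨ihm, ihf⟩ := ih (gridSet g x y 2)
            (rest ++ [(x - 1, y), (x + 1, y), (x, y - 1), (x, y + 1)]) c hwf' hle'
          have hnb : [(x - 1, y), (x + 1, y), (x, y - 1), (x, y + 1)] = nbrsC (x, y) := rfl
          rw [hnb] at ihm ihf hle'
          rw [hstep, hnb]
          have hreach := fun z => reach_mark_one (q := rest) hwf hin h0 z
          constructor
          · refine ⟨ihm.1.trans (shape_set hwf hin), ?_⟩
            intro x' y' hx' hy'
            constructor
            · intro hR
              rcases (hreach (x', y')).1 hR with he | hR'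
              · by_cases hR2 : ReachC m n (gridSet g x y 2) (rest ++ nbrsC (x, y)) (x', y')
                · exact (ihm.2 x' y' hx' hy').1 hR2
                · rw [(ihm.2 x' y' hx' hy').2 hR2,
                      gridGet_set hwf hin x' y' hx' hy', if_pos ⟨congrArg Prod.fst he, congrArg Prod.snd he⟩]
              · exact (ihm.2 x' y' hx' hy').1 hR'
            · intro hnR
              have hne : (x', y') ≠ (x, y) := fun he => hnR ((hreach (x', y')).2 (Or.inl he))
              have hnR' : ¬ ReachC m n (gridSet g x y 2) (rest ++ nbrsC (x, y)) (x', y') :=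
                fun hr => hnR ((hreach (x', y')).2 (Or.inr hr))
              rw [(ihm.2 x' y' hx' hy').2 hnR', gridGet_set hwf hin x' y' hx' hy',
                  if_neg (fun hc => hne (Prod.ext hc.1 hc.2))]
          · rw [ihf]
            have hBQc : BadQ m n ((x, y) :: rest) ↔ BadQ m n rest := by
              unfold BadQ
              constructor
              · rintro ⟨p, hm, hni⟩
                rcases List.mem_cons.1 hm with rfl | hq
                · exact absurd hin hni
                · exact ⟨p, hq, hni⟩
              · rintro ⟨p, hm, hni⟩
                exact ⟨p, List.mem_cons_of_mem _ hm, hni⟩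
            have hBQ' : BadQ m n (rest ++ nbrsC (x, y)) ↔ BadQ m n rest ∨ BadQ m n (nbrsC (x, y)) := by
              unfold BadQ
              constructor
              · rintro ⟨p, hm, hni⟩
                rcases List.mem_append.1 hm with hq | hq
                · exact Or.inl ⟨p, hq, hni⟩
                · exact Or.inr ⟨p, hq, hni⟩
              · rintro (⟨p, hm, hni⟩ | ⟨p, hm, hni⟩)
                · exact ⟨p, List.mem_append_left _ hm, hni⟩
                · exact ⟨p, List.mem_append_right _ hm, hni⟩
            have hBC : BadC m n g ((x, y) :: rest) ↔
                BadQ m n (nbrsC (x, y)) ∨ BadC m n (gridSet g x y 2) (rest ++ nbrsC (x, y)) := by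
              unfold BadC BadQ
              constructor
              · rintro ⟨z, hz, ht⟩
                rcases (hreach z).1 hz with rfl | hz'
                · exact Or.inl ht
                · exact Or.inr ⟨z, hz', ht⟩
              · rintro (ht | ⟨z, hz, ht⟩)
                · exact ⟨(x, y), (hreach (x, y)).2 (Or.inl rfl), ht⟩
                · exact ⟨z, (hreach z).2 (Or.inr hz), ht⟩
            rw [hBQc, hBQ', hBC]
            tauto
        · -- water / visited branch
          have hstep : bfsLoop m n (fuel + 1) g ((x, y) :: rest) c = bfsLoop m n fuel g rest c := by
            show (if ¬(0 ≤ x ∧ x < m ∧ 0 ≤ y ∧ y < n) then _ else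
              if gridGet g x y ≠ 0 then _ else _) = _
            rw [if_neg (not_not_intro hC), if_pos h0]
          have hle' : 5 * zerosN g + rest.length ≤ fuel := by
            simp only [List.length_cons] at hle; omega
          obtain ⟨ihm, ihf⟩ := ih g rest c hwf hle'
          have hirr : ∀ z, ReachC m n g ((x, y) :: rest) z ↔ ReachC m n g rest z :=
            fun z => reach_cons_irrel (fun hc => h0 hc.2)
          rw [hstep]
          refine ⟨markSpec_congr (fun z => (hirr z).symm) ihm, ?_⟩
          rw [ihf]
          have hBQc : BadQ m n ((x, y) :: rest) ↔ BadQ m n rest := by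
            unfold BadQ
            constructor
            · rintro ⟨p, hm, hni⟩
              rcases List.mem_cons.1 hm with rfl | hq
              · exact absurd hC hni
              · exact ⟨p, hq, hni⟩
            · rintro ⟨p, hm, hni⟩
              exact ⟨p, List.mem_cons_of_mem _ hm, hni⟩
          rw [hBQc, badC_congr hirr]
      · -- out-of-bounds branch
        have hstep : bfsLoop m n (fuel + 1) g ((x, y) :: rest) c = bfsLoop m n fuel g rest false := by
          show (if ¬(0 ≤ x ∧ x < m ∧ 0 ≤ y ∧ y < n) then _ else
            if gridGet g x y ≠ 0 then _ else _) = _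
          rw [if_pos hC]
        have hle' : 5 * zerosN g + rest.length ≤ fuel := by
          simp only [List.length_cons] at hle; omega
        obtain ⟨ihm, ihf⟩ := ih g rest false hwf hle'
        have hnz : ¬ (inbC m n (x, y) ∧ gridGet g x y = 0) := fun hc => hC hc.1
        have hirr : ∀ z, ReachC m n g ((x, y) :: rest) z ↔ ReachC m n g rest z :=
          fun z => reach_cons_irrel hnz
        rw [hstep]
        refine ⟨markSpec_congr (fun z => (hirr z).symm) ihm, ?_⟩
        rw [ihf]
        have hbq : BadQ m n ((x, y) :: rest) := ⟨(x, y), List.mem_cons_self, hC⟩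
        constructor
        · rintro ⟨h, -⟩; cases h
        · rintro ⟨-, hq, -⟩; exact absurd hbq hq

-- flood-fill (B) characterisation ----------------------------------------------

theorem mem_ite_cons {α : Type} {c : Prop} [Decidable c] (a : α) (l : List α) (p : α) :
    p ∈ (if c then a :: l else l) ↔ (c ∧ p = a) ∨ p ∈ l := by
  split_ifs with h <;> simp [h]

theorem mem_push4 {m n x y : Int} {rest : List (Int × Int)} (p : Int × Int) :
    p ∈ push4 m n x y rest ↔ (p ∈ nbrsC (x, y) ∧ inbC m n p) ∨ p ∈ rest := by
  simp only [push4, mem_ite_cons, nbrsC, inbC, List.mem_cons, List.not_mem_nil, or_false]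
  constructor
  · rintro (⟨h, rfl⟩ | ⟨h, rfl⟩ | ⟨h, rfl⟩ | ⟨h, rfl⟩ | h)
    · exact Or.inl ⟨Or.inr (Or.inr (Or.inr rfl)), h⟩
    · exact Or.inl ⟨Or.inr (Or.inr (Or.inl rfl)), h⟩
    · exact Or.inl ⟨Or.inr (Or.inl rfl), h⟩
    · exact Or.inl ⟨Or.inl rfl, h⟩
    · exact Or.inr h
  · rintro (⟨(rfl | rfl | rfl | rfl), hi⟩ | h)
    · exact Or.inr (Or.inr (Or.inr (Or.inl ⟨hi, rfl⟩)))
    · exact Or.inr (Or.inr (Or.inl ⟨hi, rfl⟩))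
    · exact Or.inr (Or.inl ⟨hi, rfl⟩)
    · exact Or.inl ⟨hi, rfl⟩
    · exact Or.inr (Or.inr (Or.inr (Or.inr h)))

theorem flood_char {m n : Int} :
    ∀ (fuel : Nat) (g : List (List Int)) (stack comp : List (Int × Int)),
    Wf m n g → (∀ p ∈ stack, inbC m n p) → 5 * zerosN g + stack.length ≤ fuel →
    markSpec g (floodLoop m n fuel g stack comp).1 (ReachC m n g stack) ∧
    (∀ z, z ∈ (floodLoop m n fuel g stack comp).2 ↔ z ∈ comp ∨ ReachC m n g stack z) := by
  intro fuel
  induction fuel with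
  | zero =>
    intro g stack comp hwf hsk hle
    have hq : stack = [] := by
      cases stack with
      | nil => rfl
      | cons a l => simp at hle
    subst hq
    refine ⟨markSpec_of_empty (fun z => reach_nil), fun z => ?_⟩
    simp [floodLoop, fun z => @reach_nil m n g z]
  | succ fuel ih =>
    intro g stack comp hwf hsk hle
    rcases stack with _ | ⟨⟨x, y⟩, rest⟩
    · refine ⟨markSpec_of_empty (fun z => reach_nil), fun z => ?_⟩
      simp [floodLoop, fun z => @reach_nil m n g z]
    · have hin : inbC m n (x, y) := hsk _ List.mem_cons_self
      have hrest : ∀ p ∈ rest, inbC m n p := fun p hp => hsk p (List.mem_cons_of_mem _ hp)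
      by_cases h0 : gridGet g x y = 0
      · -- land: mark, record, push the in-bounds neighbours
        have hstep : floodLoop m n (fuel + 1) g ((x, y) :: rest) comp =
            floodLoop m n fuel (gridSet g x y 2) (push4 m n x y rest) (comp ++ [(x, y)]) := by
          show (if gridGet g x y ≠ 0 then _ else _) = _
          rw [if_neg (not_not_intro h0)]
        have hwf' : Wf m n (gridSet g x y 2) := wf_of_shape (shape_set hwf hin) hwf
        have hz := zerosN_set hwf hin h0
        have hplen : (push4 m n x y rest).length ≤ rest.length + 4 := by
          unfold push4
          split_ifs <;> simp
        have hle' : 5 * zerosN (gridSet g x y 2) + (push4 m n x y rest).length ≤ fuel := by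
          simp only [List.length_cons] at hle
          omega
        have hsk' : ∀ p ∈ push4 m n x y rest, inbC m n p := by
          intro p hp
          rcases (mem_push4 p).1 hp with ⟨-, hi⟩ | hr
          · exact hi
          · exact hrest p hr
        obtain ⟨ihm, ihc⟩ := ih (gridSet g x y 2) (push4 m n x y rest) (comp ++ [(x, y)]) hwf' hsk' hle'
        -- the pushed stack has the same in-bounds members as rest ++ nbrsC (x, y)
        have hsrc : ∀ z, ReachC m n (gridSet g x y 2) (push4 m n x y rest) z ↔
            ReachC m n (gridSet g x y 2) (rest ++ nbrsC (x, y)) z := by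
          intro z
          apply reach_sources_iff
          intro w hw
          rw [mem_push4, List.mem_append]
          tauto
        have hreach := fun z => reach_mark_one (q := rest) hwf hin h0 z
        rw [hstep]
        constructor
        · refine ⟨ihm.1.trans (shape_set hwf hin), ?_⟩
          intro x' y' hx' hy'
          constructor
          · intro hR
            rcases (hreach (x', y')).1 hR with he | hR'
            · by_cases hR2 : ReachC m n (gridSet g x y 2) (push4 m n x y rest) (x', y')
              · exact (ihm.2 x' y' hx' hy').1 hR2
              · rw [(ihm.2 x' y' hx' hy').2 hR2, gridGet_set hwf hin x' y' hx' hy',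
                    if_pos ⟨congrArg Prod.fst he, congrArg Prod.snd he⟩]
            · exact (ihm.2 x' y' hx' hy').1 ((hsrc _).2 hR')
          · intro hnR
            have hne : (x', y') ≠ (x, y) := fun he => hnR ((hreach (x', y')).2 (Or.inl he))
            have hnR' : ¬ ReachC m n (gridSet g x y 2) (push4 m n x y rest) (x', y') :=
              fun hr => hnR ((hreach (x', y')).2 (Or.inr ((hsrc _).1 hr)))
            rw [(ihm.2 x' y' hx' hy').2 hnR', gridGet_set hwf hin x' y' hx' hy',
                if_neg (fun hc => hne (Prod.ext hc.1 hc.2))]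
        · intro z
          rw [ihc z, hsrc z, hreach z]
          simp only [List.mem_append, List.mem_cons, List.not_mem_nil, or_false]
          tauto
      · -- water or already marked: skip
        have hstep : floodLoop m n (fuel + 1) g ((x, y) :: rest) comp =
            floodLoop m n fuel g rest comp := by
          show (if gridGet g x y ≠ 0 then _ else _) = _
          rw [if_pos h0]
        have hle' : 5 * zerosN g + rest.length ≤ fuel := by
          simp only [List.length_cons] at hle; omega
        obtain ⟨ihm, ihc⟩ := ih g rest comp hwf hrest hle'
        have hirr : ∀ z, ReachC m n g ((x, y) :: rest) z ↔ ReachC m n g rest z :=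
          fun z => reach_cons_irrel (fun hc => h0 hc.2)
        rw [hstep]
        exact ⟨markSpec_congr (fun z => (hirr z).symm) ihm,
          fun z => by rw [ihc z, hirr z]⟩

-- closed-ness: interior test over the component ↔ no reached cell has an
-- out-of-bounds neighbour ------------------------------------------------------

theorem border_iff {m n : Int} {p : Int × Int} (hp : inbC m n p) :
    (∃ t ∈ nbrsC p, ¬ inbC m n t) ↔ ¬ (0 < p.1 ∧ p.1 < m - 1 ∧ 0 < p.2 ∧ p.2 < n - 1) := by
  obtain ⟨x, y⟩ := p
  obtain ⟨h1, h2, h3, h4⟩ := hp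
  simp only at h1 h2 h3 h4
  constructor
  · rintro ⟨t, ht, hni⟩
    simp only [nbrsC, List.mem_cons, List.not_mem_nil, or_false] at ht
    rcases ht with rfl | rfl | rfl | rfl <;>
      (simp only [inbC, not_and_or, not_le, not_lt] at hni ⊢; omega)
  · intro h
    simp only [not_and_or, not_lt] at h
    by_cases hx1 : x ≤ 0
    · exact ⟨(x - 1, y), by simp [nbrsC], by simp only [inbC, not_and_or, not_le]; omega⟩
    · by_cases hx2 : m - 1 ≤ x
      · exact ⟨(x + 1, y), by simp [nbrsC], by simp only [inbC, not_and_or, not_lt]; omega⟩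
      · by_cases hy1 : y ≤ 0
        · exact ⟨(x, y - 1), by simp [nbrsC], by simp only [inbC, not_and_or, not_le]; omega⟩
        · have hy2 : n - 1 ≤ y := by tauto
          exact ⟨(x, y + 1), by simp [nbrsC], by simp only [inbC, not_and_or, not_lt]; omega⟩

-- the two flood fills agree on one seed ----------------------------------------

theorem inner_eq {m n : Int} {g : List (List Int)} {i j : Int}
    (hwf : Wf m n g) (hin : inbC m n (i, j)) :
    bfsRun m n g i j = ((floodRun m n g i j).1, isClosedComp m n (floodRun m n g i j).2) := by
  have hzc := zerosN_le_cells g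
  obtain ⟨mB, fB⟩ := bfs_char (5 * (g.map List.length).sum + 1) g [(i, j)] true hwf
    (by simp only [List.length_cons, List.length_nil]; omega)
  obtain ⟨mF, cF⟩ := flood_char (5 * (g.map List.length).sum + 1) g [(i, j)] [] hwf
    (by intro p hp; simp only [List.mem_cons, List.not_mem_nil, or_false] at hp; subst hp; exact hin)
    (by simp only [List.length_cons, List.length_nil]; omega)
  have hgrid : (bfsRun m n g i j).1 = (floodRun m n g i j).1 := markSpec_unique mB mF
  have hflag : (bfsRun m n g i j).2 = isClosedComp m n (floodRun m n g i j).2 := by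
    rw [Bool.eq_iff_iff]
    unfold bfsRun
    rw [fB]
    have hcomp : ∀ z, z ∈ (floodRun m n g i j).2 ↔ ReachC m n g [(i, j)] z := by
      intro z
      unfold floodRun
      rw [cF z]
      simp
    have hclosed : isClosedComp m n (floodRun m n g i j).2 = true ↔
        ∀ z, ReachC m n g [(i, j)] z → (0 < z.1 ∧ z.1 < m - 1 ∧ 0 < z.2 ∧ z.2 < n - 1) := by
      unfold isClosedComp
      rw [List.all_eq_true]
      constructor
      · intro h z hz
        have := h z ((hcomp z).2 hz)
        exact of_decide_eq_true this
      · intro h p hp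
        exact decide_eq_true (h p ((hcomp p).1 hp))
    rw [hclosed]
    have hnq : ¬ BadQ m n [(i, j)] := by
      rintro ⟨p, hp, hni⟩
      simp only [List.mem_cons, List.not_mem_nil, or_false] at hp
      subst hp
      exact hni hin
    constructor
    · rintro ⟨-, -, hb⟩
      intro z hz
      by_contra hzi
      exact hb ⟨z, hz, (border_iff (reach_inb hz)).2 hzi⟩
    · intro hall
      refine ⟨rfl, hnq, ?_⟩
      rintro ⟨p, hp, ht⟩
      exact (border_iff (reach_inb hp)).1 ht (hall p hp)
  exact Prod.ext hgrid hflag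

-- outer loops ------------------------------------------------------------------

theorem outer_eq {m n : Int} (cells : List (Int × Int))
    (hcells : ∀ p ∈ cells, inbC m n p) :
    ∀ (st : List (List Int) × Int), Wf m n st.1 →
    cells.foldl (fun st ij =>
        if gridGet st.1 ij.1 ij.2 = 0 then
          let r := bfsRun m n st.1 ij.1 ij.2
          (r.1, st.2 + if r.2 then 1 else 0)
        else st) st =
    cells.foldl (fun st ij =>
        if gridGet st.1 ij.1 ij.2 = 0 then
          let r := floodRun m n st.1 ij.1 ij.2
          (r.1, st.2 + if isClosedComp m n r.2 then 1 else 0)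
        else st) st := by
  induction cells with
  | nil => intro st hst; rfl
  | cons p cells ih =>
    intro st hst
    simp only [List.foldl_cons]
    by_cases h0 : gridGet st.1 p.1 p.2 = 0
    · have hin : inbC m n (p.1, p.2) := hcells p List.mem_cons_self
      have hbd := inner_eq hst hin
      have hzc := zerosN_le_cells st.1
      obtain ⟨mF, -⟩ := flood_char (5 * (st.1.map List.length).sum + 1) st.1 [(p.1, p.2)] [] hst
        (by intro q hq; simp only [List.mem_cons, List.not_mem_nil, or_false] at hq; subst hq; exact hin)
        (by simp only [List.length_cons, List.length_nil]; omega)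
      rw [if_pos h0, if_pos h0, hbd]
      exact ih (fun q hq => hcells q (List.mem_cons_of_mem _ hq)) _
        (wf_of_shape mF.1 hst)
    · rw [if_neg h0, if_neg h0]
      exact ih (fun q hq => hcells q (List.mem_cons_of_mem _ hq)) st hst

-- ===== VERDICT (by name: the statement is the Claim_ definition above) =====
theorem closedIslandBFS_spec : Claim_equal_closedIslandBFS := by
  intro grid _ hpre
  obtain ⟨hne, hrows⟩ := hpre
  unfold Spec_closedIslandBFS closedIslandBFS closedIslandBFS_alt
  dsimp only
  set m : Int := (grid.length : Int) with hm
  set n : Int := ((PySem.List.pyGetD grid 0 []).length : Int) with hn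
  have hhead : PySem.List.pyGetD grid 0 [] = grid.headD [] := by
    cases grid with
    | nil => exact absurd rfl hne
    | cons a l => simp [PySem.List.pyGetD_zero]
  have hwf : Wf m n grid := by
    refine ⟨rfl, ?_⟩
    intro row hrow
    have := hrows row hrow
    rw [hn, hhead]
    exact_mod_cast this
  congr 1
  calc (PySem.List.pyRange 0 m 1).foldl (fun st i =>
          (PySem.List.pyRange 0 n 1).foldl (fun st j =>
            if gridGet st.1 i j = 0 then
              ((bfsRun m n st.1 i j).1, st.2 + if (bfsRun m n st.1 i j).2 then 1 else 0)
            else st) st) (grid, (0 : Int))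
      = ((PySem.List.pyRange 0 m 1).flatMap (fun i =>
          (PySem.List.pyRange 0 n 1).map (fun j => (i, j)))).foldl (fun st ij =>
            if gridGet st.1 ij.1 ij.2 = 0 then
              ((bfsRun m n st.1 ij.1 ij.2).1, st.2 + if (bfsRun m n st.1 ij.1 ij.2).2 then 1 else 0)
            else st) (grid, (0 : Int)) := by
        rw [List.foldl_flatMap]
        have hfun : (fun (st : List (List Int) × Int) (i : Int) =>
              (PySem.List.pyRange 0 n 1).foldl (fun st j =>
                if gridGet st.1 i j = 0 then
                  ((bfsRun m n st.1 i j).1, st.2 + if (bfsRun m n st.1 i j).2 then 1 else 0)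
                else st) st)
            = (fun (st : List (List Int) × Int) (i : Int) =>
              ((PySem.List.pyRange 0 n 1).map (fun j => (i, j))).foldl (fun st ij =>
                if gridGet st.1 ij.1 ij.2 = 0 then
                  ((bfsRun m n st.1 ij.1 ij.2).1, st.2 + if (bfsRun m n st.1 ij.1 ij.2).2 then 1 else 0)
                else st) st) := by
          funext st i
          rw [List.foldl_map]
        rw [hfun]
    _ = ((PySem.List.pyRange 0 m 1).flatMap (fun i =>
          (PySem.List.pyRange 0 n 1).map (fun j => (i, j)))).foldl (fun st ij =>
            if gridGet st.1 ij.1 ij.2 = 0 then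
              ((floodRun m n st.1 ij.1 ij.2).1, st.2 + if isClosedComp m n (floodRun m n st.1 ij.1 ij.2).2 then 1 else 0)
            else st) (grid, (0 : Int)) := by
        apply outer_eq _ _ _ hwf
        intro p hp
        obtain ⟨i, hi, hp2⟩ := List.mem_flatMap.1 hp
        obtain ⟨j, hj, rfl⟩ := List.mem_map.1 hp2
        have hi' := PySem.List.mem_pyRange_one.1 hi
        have hj' := PySem.List.mem_pyRange_one.1 hj
        exact ⟨hi'.1, hi'.2, hj'.1, hj'.2⟩
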